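-- pv_equiv track=rewrite | github.com/LeslieFire/recsys | recsys/coocMatRecommend.py | GetInvertedList
-- ===== SOURCE A (Python) =====
-- def GetInvertedList(data):
-- 	ret = {}
-- 	for user, item in data:
-- 		if user not in ret.keys():
-- 			ret[user] = []
-- 		if item in ret[user]:
-- 			continue
-- 		ret[user].append(item)
--
-- 	return ret
-- ===== SOURCE B (Python) =====
-- def GetInvertedList(data):
--     # Two-pass decomposition: first group all items per user, then dedup each
--     # user's item list order-preservingly. Same return value as the one-pass
--     # version; list membership (not a set) so unhashable items behave the same.
--     groups = {}
--     for user, item in data: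
--         groups.setdefault(user, []).append(item)
--     ret = {}
--     for user, items in groups.items():
--         seen = []
--         for it in items:
--             if it not in seen:
--                 seen.append(it)
--         ret[user] = seen
--     return ret
-- ===== Notes on version B (the rewrite author's own statement) =====
-- stated objective: alternative
-- what changed: Single interleaved membership-check-and-append loop over the data replaced by a two-pass decomposition: first build a grouping dict of all items per user, then dedup each group in a separate pass.
import Mathlib
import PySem

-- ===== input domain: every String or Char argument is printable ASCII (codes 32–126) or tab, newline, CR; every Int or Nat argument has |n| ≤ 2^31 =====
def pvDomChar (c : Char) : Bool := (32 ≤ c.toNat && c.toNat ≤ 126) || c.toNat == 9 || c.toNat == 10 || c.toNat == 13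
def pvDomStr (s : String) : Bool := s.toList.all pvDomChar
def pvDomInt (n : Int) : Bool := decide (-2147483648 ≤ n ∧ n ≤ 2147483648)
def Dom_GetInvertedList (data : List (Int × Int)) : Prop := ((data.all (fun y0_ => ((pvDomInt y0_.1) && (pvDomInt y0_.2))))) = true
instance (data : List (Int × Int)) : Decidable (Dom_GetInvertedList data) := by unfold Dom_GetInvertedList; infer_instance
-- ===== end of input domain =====

-- B replaces A's single interleaved group-and-dedup loop by two passes (group all items per user, then dedup each group); same return value (alternative decomposition, no speed claim).

-- ===== PORT A =====
-- one body of A's loop: `if user not in ret.keys(): ret[user] = []` then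
-- `if item in ret[user]: continue` else `ret[user].append(item)`
-- (append on an existing key = Dict.insert, which overwrites in place)
def pvAStep (a : PySem.Dict Int (List Int)) (p : Int × Int) : PySem.Dict Int (List Int) :=
  let a1 := if a.contains p.1 then a else a.insert p.1 ([] : List Int)
  let cur := a1.getD p.1 []
  if p.2 ∈ cur then a1 else a1.insert p.1 (cur ++ [p.2])

def GetInvertedList (data : List (Int × Int)) : List (Int × List Int) :=
  (data.foldl pvAStep PySem.Dict.empty).items

-- ===== PORT B =====
-- pass 1 of Source B: groups.setdefault(user, []).append(item)  (= Dict.modify with default [])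
def pvGroups (data : List (Int × Int)) : PySem.Dict Int (List Int) :=
  data.foldl (fun g p => g.modify p.1 ([] : List Int) (· ++ [p.2])) PySem.Dict.empty

-- inner dedup loop of Source B: `if it not in seen: seen.append(it)`
def pvDedupStep (seen : List Int) (it : Int) : List Int :=
  if it ∈ seen then seen else seen ++ [it]

def GetInvertedList_alt (data : List (Int × Int)) : List (Int × List Int) :=
  -- pass 2: for user, items in groups.items(): dedup items into seen; ret[user] = seen
  ((pvGroups data).items.foldl (fun r p => r.insert p.1 (p.2.foldl pvDedupStep [])) PySem.Dict.empty).items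

-- ===== PRECONDITION & SPEC =====
def Spec_GetInvertedList (data : List (Int × Int)) (out : List (Int × List Int)) : Prop := out = GetInvertedList_alt data
instance (data : List (Int × Int)) (out : List (Int × List Int)) : Decidable (Spec_GetInvertedList data out) := by unfold Spec_GetInvertedList; infer_instance

-- ===== CLAIM (what is proved, stated in full; the proofs are below) =====
def Claim_equal_GetInvertedList : Prop := ∀ (data : List (Int × Int)), Dom_GetInvertedList data → Spec_GetInvertedList data (GetInvertedList data)

-- ===== LEMMAS AND PROOFS =====

-- One A-step adds p.1 to the key set and dedup-appends p.2 to its value.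
theorem pvAStep_keys (a : PySem.Dict Int (List Int)) (p : Int × Int) :
    (pvAStep a p).keys = PySem.Set.add a.keys p.1 := by
  unfold pvAStep
  by_cases h : a.contains p.1
  · have hmem : p.1 ∈ a.keys := (PySem.Dict.contains_iff_mem_keys a p.1).mp h
    by_cases h2 : p.2 ∈ a.getD p.1 []
    · simp [h, h2, PySem.Set.add_of_mem hmem]
    · simp [h, h2, PySem.Dict.keys_insert_of_contains a _ h, PySem.Set.add_of_mem hmem]
  · have hf : a.contains p.1 = false := by simpa using h
    have hmem : p.1 ∉ a.keys := fun hm => h ((PySem.Dict.contains_iff_mem_keys a p.1).mpr hm)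
    simp only [hf, Bool.false_eq_true, if_false, PySem.Dict.getD_insert_self,
      List.not_mem_nil, List.nil_append]
    rw [PySem.Dict.keys_insert_of_contains _ _ (PySem.Dict.contains_insert_self a p.1 []),
      PySem.Dict.keys_insert_of_not_contains a ([] : List Int) hf,
      PySem.Set.add_of_not_mem hmem]

theorem pvAStep_getD (a : PySem.Dict Int (List Int)) (p : Int × Int) (k : Int) :
    (pvAStep a p).getD k [] = if p.1 = k then pvDedupStep (a.getD k []) p.2 else a.getD k [] := by
  unfold pvAStep pvDedupStep
  by_cases h : a.contains p.1
  · by_cases h2 : p.2 ∈ a.getD p.1 []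
    · rcases eq_or_ne p.1 k with rfl | hk
      · simp [h, h2]
      · simp [h, h2, hk]
    · simp only [h, if_true, h2, if_false]
      rw [PySem.Dict.getD_insert]
      rcases eq_or_ne p.1 k with rfl | hk
      · simp [h2]
      · simp [hk, Ne.symm hk]
  · have hf : a.contains p.1 = false := by simpa using h
    have hnd : a.getD p.1 [] = [] := PySem.Dict.getD_of_not_contains a ([] : List Int) hf
    simp only [hf, Bool.false_eq_true, if_false, PySem.Dict.getD_insert_self,
      List.not_mem_nil, List.nil_append]
    rw [PySem.Dict.insert_insert_self, PySem.Dict.getD_insert]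
    rcases eq_or_ne p.1 k with rfl | hk
    · simp [hnd]
    · simp [hk, Ne.symm hk]

theorem pvAfold_keys (data : List (Int × Int)) (d : PySem.Dict Int (List Int)) :
    (data.foldl pvAStep d).keys = PySem.Set.update d.keys (data.map (·.1)) := by
  induction data generalizing d with
  | nil => simp [PySem.Set.update_nil]
  | cons p rest ih =>
    simp only [List.foldl_cons, List.map_cons, PySem.Set.update_cons]
    rw [ih, pvAStep_keys]

theorem pvAfold_getD (data : List (Int × Int)) (d : PySem.Dict Int (List Int)) (k : Int) :
    (data.foldl pvAStep d).getD k [] =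
      ((data.filter (fun p => p.1 == k)).map (·.2)).foldl pvDedupStep (d.getD k []) := by
  induction data generalizing d with
  | nil => simp
  | cons p rest ih =>
    simp only [List.foldl_cons, List.filter_cons]
    rw [ih, pvAStep_getD]
    rcases eq_or_ne p.1 k with rfl | hk
    · simp
    · simp [hk]

theorem pvAfold_nodup (data : List (Int × Int)) (d : PySem.Dict Int (List Int))
    (h : d.keys.Nodup) : (data.foldl pvAStep d).keys.Nodup := by
  induction data generalizing d with
  | nil => exact h
  | cons p rest ih =>
    simp only [List.foldl_cons]
    exact ih _ (by rw [pvAStep_keys]; exact PySem.Set.nodup_add _ _ h)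

theorem pvGroups_keys (data : List (Int × Int)) :
    (pvGroups data).keys = PySem.Set.ofList (data.map (·.1)) := by
  unfold pvGroups
  rw [PySem.Dict.keys_foldl_modify_key data (fun p => p.1) ([] : List Int)
    (fun _ p => (· ++ [p.2]))]
  simp [PySem.Set.update_nil_left]

theorem pvGroups_getD (data : List (Int × Int)) (k : Int) :
    (pvGroups data).getD k [] = (data.filter (fun p => p.1 == k)).map (·.2) := by
  unfold pvGroups
  rw [PySem.Dict.getD_foldl_modify_append]
  simp

-- ===== VERDICT (by name: the statement is the Claim_ definition above) =====
theorem GetInvertedList_spec : Claim_equal_GetInvertedList := by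
  intro data _
  unfold Spec_GetInvertedList GetInvertedList GetInvertedList_alt
  have hAnd : (data.foldl pvAStep PySem.Dict.empty).keys.Nodup :=
    pvAfold_nodup data _ PySem.Dict.nodup_keys_empty
  rw [PySem.Dict.items_eq_map_keys _ hAnd []]
  have hGnd : (pvGroups data).keys.Nodup := by
    rw [pvGroups_keys]; exact PySem.Set.nodup_ofList _
  have hfresh : ∀ q ∈ (pvGroups data).items,
      (PySem.Dict.empty : PySem.Dict Int (List Int)).contains q.1 = false := by
    intro q _; exact PySem.Dict.contains_empty _
  rw [PySem.Dict.items_foldl_insert_fresh (pvGroups data).items (fun q => q.1)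
      (fun q => q.2.foldl pvDedupStep []) PySem.Dict.empty hfresh hGnd]
  rw [PySem.Dict.items_eq_map_keys (pvGroups data) hGnd []]
  rw [pvAfold_keys, pvGroups_keys]
  simp only [List.map_map]
  have hempty : (PySem.Dict.empty : PySem.Dict Int (List Int)).items = [] := rfl
  rw [hempty, List.nil_append]
  apply List.map_congr_left
  intro k _
  simp only [Function.comp]
  rw [pvAfold_getD, pvGroups_getD]
  simp
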